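-- pv_equiv track=rewrite | github.com/MrBrantCode/unitest_baseline | mut_generate/mist_train_taco/taco_17895/solution.py | find_cut_position
-- ===== SOURCE A (Python) =====
-- def find_cut_position(test_cases):
--     N = 100000
--     prime = [-1 for i in range(N + 1)]
--     i = 2
--     while i <= N:
--         if prime[i] == -1:
--             prime[i] = i
--             for j in range(2 * i, N + 1, i):
--                 if prime[j] == -1:
--                     prime[j] = i
--         i += 1
--
--     results = []
--
--     for case in test_cases:
--         n, arr = case
--         range_p = [[-1, -1] for i in range(N + 1)]
--
--         for i in range(n):
--             a = arr[i]
--             while a > 1: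
--                 x = prime[a]
--                 if range_p[x][0] == -1:
--                     range_p[x][0] = i
--                     range_p[x][1] = i
--                 else:
--                     range_p[x][1] = i
--                 a = a // x
--
--         mark = [0 for i in range(n)]
--         for i in range(2, N + 1):
--             if range_p[i][0] != -1:
--                 l = range_p[i][0]
--                 r = range_p[i][1]
--                 mark[l] += 1
--                 mark[r] -= 1
--
--         for i in range(1, n):
--             mark[i] += mark[i - 1]
--
--         for i in range(n):
--             if mark[i] == 0:
--                 results.append(i + 1)
--                 break
--
--     return results
-- ===== SOURCE B (Python) =====
-- def find_cut_position(test_cases):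
--     N = 100000
--     prime = [-1 for i in range(N + 1)]
--     i = 2
--     while i <= N:
--         if prime[i] == -1:
--             prime[i] = i
--             for j in range(2 * i, N + 1, i):
--                 if prime[j] == -1:
--                     prime[j] = i
--         i += 1
--
--     results = []
--
--     for case in test_cases:
--         n, arr = case
--         # factor each of the first n elements once
--         fs = []
--         for i in range(n):
--             a = arr[i]
--             ps = []
--             while a > 1:
--                 x = prime[a]
--                 ps.append(x)
--                 a = a // x
--             fs.append(ps)
--         # last occurrence index of each prime actually present (a dict, not an N-size array)
--         last = {}
--         for i, ps in enumerate(fs):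
--             for p in ps:
--                 last[p] = i
--         # sweep: position i is a cut iff no prime seen so far occurs again later
--         reach = -1
--         for i, ps in enumerate(fs):
--             for p in ps:
--                 if last[p] > reach:
--                     reach = last[p]
--             if reach <= i:
--                 results.append(i + 1)
--                 break
--
--     return results
-- ===== Notes on version B (the rewrite author's own statement) =====
-- stated objective: faster
-- what changed: Per test case, instead of allocating an N=100000-sized range table, scanning all N slots to build a difference array and prefix-summing it, B factors each element once, keeps the last occurrence of each prime actually present in a dict, and finds the first cut with a single running-maximum ('reach') sweep over the n positions.
import Mathlib
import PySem

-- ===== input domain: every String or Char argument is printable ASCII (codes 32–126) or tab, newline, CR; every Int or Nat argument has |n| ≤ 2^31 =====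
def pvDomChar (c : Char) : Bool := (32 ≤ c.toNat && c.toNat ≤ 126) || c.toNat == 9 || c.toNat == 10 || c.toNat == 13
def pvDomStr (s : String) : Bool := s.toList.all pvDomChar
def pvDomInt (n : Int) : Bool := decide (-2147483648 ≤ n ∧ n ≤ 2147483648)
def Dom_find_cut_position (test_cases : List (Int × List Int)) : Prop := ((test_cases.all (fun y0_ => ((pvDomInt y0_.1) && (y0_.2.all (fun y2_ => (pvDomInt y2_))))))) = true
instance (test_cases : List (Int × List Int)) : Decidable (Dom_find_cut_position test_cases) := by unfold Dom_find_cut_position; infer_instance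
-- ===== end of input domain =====

-- B replaces A's per-case N=100000-sized range table + difference-array + prefix-sum scan by a
-- dict of last occurrences of the primes actually present and a single running-maximum sweep.

-- ===== PORT A =====
-- smallest-prime-factor sieve (Python: the initial while-loop over prime[])
def pvSieveA : Array Int :=
  (PySem.List.pyRange 2 100001).foldl (fun prime i =>
    if prime.getD i.toNat 0 == -1 then
      (PySem.List.pyRange (2 * i) 100001 i).foldl (fun prime j =>
        if prime.getD j.toNat 0 == -1 then prime.setIfInBounds j.toNat i else prime)
        (prime.setIfInBounds i.toNat i)
    else prime) (Array.replicate 100001 (-1 : Int))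

-- Python: the inner `while a > 1` loop updating range_p; fuel = a.toNat (enough: a shrinks each step)
def pvFacUpdA (prime : Array Int) : Nat → Int → Int → Array (Int × Int) → Array (Int × Int)
  | 0, _, _, rp => rp
  | fuel + 1, a, i, rp =>
    if 1 < a then
      let x := prime.getD a.toNat 0
      let cur := rp.getD x.toNat (-1, -1)
      let rp' := if cur.1 == -1 then rp.setIfInBounds x.toNat (i, i)
                 else rp.setIfInBounds x.toNat (cur.1, i)
      pvFacUpdA prime fuel (PySem.Int.floordiv a x) i rp'
    else rp

-- Python: `for i in range(n): a = arr[i]; while a > 1: ...` building range_p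
def pvRpA (prime : Array Int) (n : Int) (arr : List Int) : Array (Int × Int) :=
  (PySem.List.pyRange 0 n).foldl (fun rp i =>
    let a := PySem.List.pyGetD arr i 0
    pvFacUpdA prime a.toNat a i rp) (Array.replicate 100001 ((-1 : Int), (-1 : Int)))

-- Python: `for i in range(2, N+1): if range_p[i][0] != -1: mark[l] += 1; mark[r] -= 1`
def pvMark1A (rp : Array (Int × Int)) (n : Int) : Array Int :=
  (PySem.List.pyRange 2 100001).foldl (fun mark i =>
    let c := rp.getD i.toNat (-1, -1)
    if c.1 != -1 then
      let mark' := mark.setIfInBounds c.1.toNat (mark.getD c.1.toNat 0 + 1)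
      mark'.setIfInBounds c.2.toNat (mark'.getD c.2.toNat 0 - 1)
    else mark) (Array.replicate n.toNat (0 : Int))

-- Python: `for i in range(1, n): mark[i] += mark[i-1]`
def pvMark2A (mark : Array Int) (n : Int) : Array Int :=
  (PySem.List.pyRange 1 n).foldl (fun mark i =>
    mark.setIfInBounds i.toNat (mark.getD i.toNat 0 + mark.getD (i - 1).toNat 0)) mark

-- Python: `for i in range(n): if mark[i] == 0: results.append(i+1); break`
def pvFindA (mark : Array Int) : List Int → List Int
  | [] => []
  | i :: rest => if mark.getD i.toNat 0 == 0 then [i + 1] else pvFindA mark rest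

def pvCaseA (prime : Array Int) (n : Int) (arr : List Int) : List Int :=
  pvFindA (pvMark2A (pvMark1A (pvRpA prime n arr) n) n) (PySem.List.pyRange 0 n)

def find_cut_position (test_cases : List (Int × List Int)) : List Int :=
  test_cases.foldl (fun results case => results ++ pvCaseA pvSieveA case.1 case.2) []

-- ===== PORT B =====
-- B builds the identical smallest-prime-factor sieve once
def pvSieveB : Array Int :=
  (PySem.List.pyRange 2 100001).foldl (fun prime i =>
    if prime.getD i.toNat 0 == -1 then
      (PySem.List.pyRange (2 * i) 100001 i).foldl (fun prime j =>
        if prime.getD j.toNat 0 == -1 then prime.setIfInBounds j.toNat i else prime)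
        (prime.setIfInBounds i.toNat i)
    else prime) (Array.replicate 100001 (-1 : Int))

-- Python: `ps = []; while a > 1: x = prime[a]; ps.append(x); a = a // x`; fuel = a.toNat
def pvFacB (prime : Array Int) : Nat → Int → List Int
  | 0, _ => []
  | fuel + 1, a =>
    if 1 < a then
      let x := prime.getD a.toNat 0
      x :: pvFacB prime fuel (PySem.Int.floordiv a x)
    else []

-- Python: `fs = []; for i in range(n): ... fs.append(ps)`
def pvFsB (prime : Array Int) (n : Int) (arr : List Int) : List (List Int) :=
  (PySem.List.pyRange 0 n).foldl (fun fs i =>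
    let a := PySem.List.pyGetD arr i 0
    fs ++ [pvFacB prime a.toNat a]) ([] : List (List Int))

-- Python: `last = {}; for i, ps in enumerate(fs): for p in ps: last[p] = i`
def pvLastB (fs : List (List Int)) : PySem.Dict Int Int :=
  fs.zipIdx.foldl (fun last ip =>
    ip.1.foldl (fun last p => last.insert p ((ip.2 : Nat) : Int)) last) PySem.Dict.empty

-- Python: `reach = -1; for i, ps in enumerate(fs): ...; if reach <= i: results.append(i+1); break`
def pvScanB (last : PySem.Dict Int Int) : List (List Int × Nat) → Int → List Int
  | [], _ => []
  | (ps, i) :: rest, reach =>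
    let reach' := ps.foldl (fun reach p =>
      if last.getD p 0 > reach then last.getD p 0 else reach) reach
    if reach' ≤ (i : Int) then [(i : Int) + 1] else pvScanB last rest reach'

def pvCaseB (prime : Array Int) (n : Int) (arr : List Int) : List Int :=
  let fs := pvFsB prime n arr
  pvScanB (pvLastB fs) fs.zipIdx (-1)

def find_cut_position_alt (test_cases : List (Int × List Int)) : List Int :=
  test_cases.foldl (fun results case => results ++ pvCaseB pvSieveB case.1 case.2) []

-- ===== PRECONDITION & SPEC =====
-- Pre_ excludes exactly the inputs on which the Python A raises IndexError: a case whose count n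
-- exceeds len(arr) (arr[i] out of range), or one of the first n elements above 100000 (prime[a]
-- out of range).  Everything else (n ≤ 0, elements ≤ 1, negatives) is admitted.
def Pre_find_cut_position (test_cases : List (Int × List Int)) : Prop :=
  ∀ c ∈ test_cases, c.1 ≤ (c.2.length : Int) ∧ ∀ x ∈ c.2.take c.1.toNat, x ≤ 100000
instance (test_cases : List (Int × List Int)) : Decidable (Pre_find_cut_position test_cases) := by
  unfold Pre_find_cut_position; infer_instance

def pvWitness_find_cut_position : (List (Int × List Int)) := [(3, [2, 6, 4]), (0, [])]

def Spec_find_cut_position (test_cases : List (Int × List Int)) (out : List Int) : Prop := out = find_cut_position_alt test_cases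
instance (test_cases : List (Int × List Int)) (out : List Int) : Decidable (Spec_find_cut_position test_cases out) := by unfold Spec_find_cut_position; infer_instance

-- ===== CLAIM (what is proved, stated in full; the proofs are below) =====
def Claim_equal_find_cut_position : Prop := ∀ (test_cases : List (Int × List Int)), Dom_find_cut_position test_cases → Pre_find_cut_position test_cases → Spec_find_cut_position test_cases (find_cut_position test_cases)

-- ===== LEMMAS AND PROOFS =====

theorem pvSieveB_eq : pvSieveB = pvSieveA := rfl

-- the sieve delivers a value in [2, 100000] at every index 2..100000
def pvSieveGood (P : Array Int) : Prop :=
  ∀ c : Nat, 2 ≤ c → c ≤ 100000 → 2 ≤ P.getD c 0 ∧ P.getD c 0 ≤ 100000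

-- generic array helpers used throughout
theorem pvArr_getD_set {α : Type} (a : Array α) (i j : Nat) (v d : α) :
    (a.setIfInBounds i v).getD j d = if i = j ∧ i < a.size then v else a.getD j d := by
  simp only [Array.getD_eq_getD_getElem?, Array.getElem?_setIfInBounds]
  split
  · rename_i h; subst h; split <;> simp_all
  · simp_all

theorem pvArr_getD_replicate {α : Type} (n j : Nat) (v d : α) :
    (Array.replicate n v).getD j d = if j < n then v else d := by
  simp only [Array.getD_eq_getD_getElem?, Array.getElem?_replicate]
  split <;> simp_all

theorem pvSieve_size_inner (l : List Int) (i : Int) (pr : Array Int) :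
    (l.foldl (fun prime j => if prime.getD j.toNat 0 == -1 then prime.setIfInBounds j.toNat i else prime) pr).size = pr.size := by
  induction l generalizing pr with
  | nil => rfl
  | cons j t ih => simp only [List.foldl_cons]; rw [ih]; split <;> simp

theorem pvSieve_stable_inner (l : List Int) (i : Int) (pr : Array Int) (c : Nat)
    (h : pr.getD c 0 ≠ -1) :
    (l.foldl (fun prime j => if prime.getD j.toNat 0 == -1 then prime.setIfInBounds j.toNat i else prime) pr).getD c 0 = pr.getD c 0 := by
  induction l generalizing pr with
  | nil => rfl
  | cons j t ih =>
    simp only [List.foldl_cons]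
    by_cases g : pr.getD j.toNat 0 = -1
    · have hne : j.toNat ≠ c := by intro he; rw [he] at g; exact h g
      have : (pr.setIfInBounds j.toNat i).getD c 0 = pr.getD c 0 := by
        rw [pvArr_getD_set]; simp [hne]
      rw [if_pos (by simp only [beq_iff_eq]; exact g), ih _ (by rw [this]; exact h), this]
    · rw [if_neg (by simp only [beq_iff_eq]; exact g), ih _ h]

theorem pvSieve_good_inner (l : List Int) (i : Int) (pr : Array Int)
    (hi : 2 ≤ i) (hi' : i ≤ 100000)
    (h : ∀ c : Nat, c ≤ 100000 → pr.getD c 0 = -1 ∨ (2 ≤ pr.getD c 0 ∧ pr.getD c 0 ≤ 100000)) :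
    ∀ c : Nat, c ≤ 100000 →
      (l.foldl (fun prime j => if prime.getD j.toNat 0 == -1 then prime.setIfInBounds j.toNat i else prime) pr).getD c 0 = -1 ∨
      (2 ≤ (l.foldl (fun prime j => if prime.getD j.toNat 0 == -1 then prime.setIfInBounds j.toNat i else prime) pr).getD c 0 ∧
        (l.foldl (fun prime j => if prime.getD j.toNat 0 == -1 then prime.setIfInBounds j.toNat i else prime) pr).getD c 0 ≤ 100000) := by
  induction l generalizing pr with
  | nil => exact h
  | cons j t ih =>
    simp only [List.foldl_cons]
    refine ih _ (fun c hc => ?_)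
    split
    · rw [pvArr_getD_set]; split
      · right; exact ⟨hi, hi'⟩
      · exact h c hc
    · exact h c hc

theorem pvSieve_outer_step_size (pr : Array Int) (i : Int) :
    ((fun prime i => if prime.getD i.toNat 0 == -1 then
        (PySem.List.pyRange (2 * i) 100001 i).foldl (fun prime j =>
          if prime.getD j.toNat 0 == -1 then prime.setIfInBounds j.toNat i else prime)
          (prime.setIfInBounds i.toNat i)
      else prime) pr i).size = pr.size := by
  simp only []
  split
  · rw [pvSieve_size_inner]; simp
  · rfl

theorem pvSieve_stable_outer (l : List Int) (pr : Array Int) (c : Nat)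
    (h : pr.getD c 0 ≠ -1) :
    (l.foldl (fun prime i => if prime.getD i.toNat 0 == -1 then
        (PySem.List.pyRange (2 * i) 100001 i).foldl (fun prime j =>
          if prime.getD j.toNat 0 == -1 then prime.setIfInBounds j.toNat i else prime)
          (prime.setIfInBounds i.toNat i)
      else prime) pr).getD c 0 = pr.getD c 0 := by
  induction l generalizing pr with
  | nil => rfl
  | cons i t ih =>
    simp only [List.foldl_cons]
    by_cases g : pr.getD i.toNat 0 = -1
    · have hne : i.toNat ≠ c := by intro he; rw [he] at g; exact h g
      have h1 : (pr.setIfInBounds i.toNat i).getD c 0 = pr.getD c 0 := by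
        rw [pvArr_getD_set]; simp [hne]
      rw [if_pos (by simp only [beq_iff_eq]; exact g), ih _ (by rw [pvSieve_stable_inner _ _ _ _ (by rw [h1]; exact h), h1]; exact h),
        pvSieve_stable_inner _ _ _ _ (by rw [h1]; exact h), h1]
    · rw [if_neg (by simp only [beq_iff_eq]; exact g), ih _ h]

theorem pvSieve_good_outer (l : List Int) (pr : Array Int)
    (hl : ∀ i ∈ l, 2 ≤ i ∧ i ≤ 100000)
    (h : ∀ c : Nat, c ≤ 100000 → pr.getD c 0 = -1 ∨ (2 ≤ pr.getD c 0 ∧ pr.getD c 0 ≤ 100000)) :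
    ∀ c : Nat, c ≤ 100000 →
      (l.foldl (fun prime i => if prime.getD i.toNat 0 == -1 then
          (PySem.List.pyRange (2 * i) 100001 i).foldl (fun prime j =>
            if prime.getD j.toNat 0 == -1 then prime.setIfInBounds j.toNat i else prime)
            (prime.setIfInBounds i.toNat i)
        else prime) pr).getD c 0 = -1 ∨
      (2 ≤ (l.foldl (fun prime i => if prime.getD i.toNat 0 == -1 then
          (PySem.List.pyRange (2 * i) 100001 i).foldl (fun prime j =>
            if prime.getD j.toNat 0 == -1 then prime.setIfInBounds j.toNat i else prime)
            (prime.setIfInBounds i.toNat i)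
        else prime) pr).getD c 0 ∧
        (l.foldl (fun prime i => if prime.getD i.toNat 0 == -1 then
          (PySem.List.pyRange (2 * i) 100001 i).foldl (fun prime j =>
            if prime.getD j.toNat 0 == -1 then prime.setIfInBounds j.toNat i else prime)
            (prime.setIfInBounds i.toNat i)
        else prime) pr).getD c 0 ≤ 100000) := by
  induction l generalizing pr with
  | nil => exact h
  | cons i t ih =>
    simp only [List.foldl_cons]
    refine ih _ (fun j hj => hl j (List.mem_cons_of_mem _ hj)) (fun c hc => ?_)
    obtain ⟨hi2, hi5⟩ := hl i (List.mem_cons_self)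
    split
    · refine pvSieve_good_inner _ _ _ hi2 hi5 (fun c hc => ?_) c hc
      rw [pvArr_getD_set]; split
      · right; exact ⟨hi2, hi5⟩
      · exact h c hc
    · exact h c hc

theorem pvSieve_cover (l : List Int) (pr : Array Int)
    (hl : ∀ i ∈ l, 2 ≤ i ∧ i ≤ 100000) (hsz : pr.size = 100001) :
    ∀ c : Int, c ∈ l →
      (l.foldl (fun prime i => if prime.getD i.toNat 0 == -1 then
          (PySem.List.pyRange (2 * i) 100001 i).foldl (fun prime j =>
            if prime.getD j.toNat 0 == -1 then prime.setIfInBounds j.toNat i else prime)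
            (prime.setIfInBounds i.toNat i)
        else prime) pr).getD c.toNat 0 ≠ -1 := by
  induction l generalizing pr with
  | nil => intro c hc; exact absurd hc (List.not_mem_nil)
  | cons i t ih =>
    intro c hc
    obtain ⟨hi2, hi5⟩ := hl i (List.mem_cons_self)
    simp only [List.foldl_cons]
    rcases List.mem_cons.mp hc with rfl | hct
    · by_cases g : pr.getD c.toNat 0 = -1
      · have hset : (pr.setIfInBounds c.toNat c).getD c.toNat 0 = c := by
          rw [pvArr_getD_set]; rw [if_pos ⟨rfl, by omega⟩]
        have hin : ((PySem.List.pyRange (2 * c) 100001 c).foldl (fun prime j =>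
            if prime.getD j.toNat 0 == -1 then prime.setIfInBounds j.toNat c else prime)
            (pr.setIfInBounds c.toNat c)).getD c.toNat 0 = c := by
          rw [pvSieve_stable_inner _ _ _ _ (by rw [hset]; omega), hset]
        rw [if_pos (by simp only [beq_iff_eq]; exact g), pvSieve_stable_outer _ _ _ (by rw [hin]; omega), hin]
        omega
      · rw [if_neg (by simp only [beq_iff_eq]; exact g), pvSieve_stable_outer _ _ _ g]
        exact g
    · refine ih _ (fun j hj => hl j (List.mem_cons_of_mem _ hj)) ?_ c hct
      rw [pvSieve_outer_step_size, hsz]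

theorem pvSieveA_good : pvSieveGood pvSieveA := by
  intro c h2 h5
  have hl : ∀ i ∈ PySem.List.pyRange 2 100001, 2 ≤ i ∧ i ≤ 100000 := by
    intro i hi
    have := PySem.List.mem_pyRange_one.mp hi
    omega
  have hinit : ∀ c : Nat, c ≤ 100000 →
      (Array.replicate 100001 (-1 : Int)).getD c 0 = -1 ∨
      (2 ≤ (Array.replicate 100001 (-1 : Int)).getD c 0 ∧ (Array.replicate 100001 (-1 : Int)).getD c 0 ≤ 100000) := by
    intro c hc; left; rw [pvArr_getD_replicate]; rw [if_pos (by omega)]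
  have hgood := pvSieve_good_outer _ _ hl hinit c h5
  have hcov := pvSieve_cover (PySem.List.pyRange 2 100001) (Array.replicate 100001 (-1 : Int)) hl
    (by simp) (c : Int) (PySem.List.mem_pyRange_one.mpr (by omega))
  rw [show ((c : Int)).toNat = c from Int.toNat_natCast c] at hcov
  unfold pvSieveA
  rcases hgood with hbad | hok
  · exact absurd hbad hcov
  · exact hok

-- ---- abstract per-case data ----
def pvRngStep (v : Int × Int) (i : Int) : Int × Int := if v.1 == -1 then (i, i) else (v.1, i)

def pvUpdA (rp : Array (Int × Int)) (x i : Int) : Array (Int × Int) :=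
  rp.setIfInBounds x.toNat (pvRngStep (rp.getD x.toNat (-1, -1)) i)

def pvF (P : Array Int) (arr : List Int) (j : Nat) : List Int :=
  pvFacB P (arr.getD j 0).toNat (arr.getD j 0)

def pvEvs (P : Array Int) (arr : List Int) (n' : Nat) : List (Nat × Int) :=
  (List.range n').flatMap (fun j => (pvF P arr j).map (fun x => (j, x)))

def pvOcc (P : Array Int) (arr : List Int) (n' : Nat) (x : Int) : List Int :=
  (((pvEvs P arr n').filter (fun e => e.2 == x)).map (fun e => ((e.1 : Nat) : Int)))

def pvAct (P : Array Int) (arr : List Int) (n' : Nat) (x : Int) : Bool :=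
  !(pvOcc P arr n' x).isEmpty

def pvFx (P : Array Int) (arr : List Int) (n' : Nat) (x : Int) : Int := (pvOcc P arr n' x).headD 0
def pvRx (P : Array Int) (arr : List Int) (n' : Nat) (x : Int) : Int := (pvOcc P arr n' x).getLastD 0

-- running maximum of last-occurrences, as B computes it
def pvRv (P : Array Int) (arr : List Int) (last : PySem.Dict Int Int) : Nat → Int
  | 0 => -1
  | s + 1 => (pvF P arr s).foldl (fun reach p =>
      if last.getD p 0 > reach then last.getD p 0 else reach) (pvRv P arr last s)

-- ---- small list utilities ----
theorem pvGetLastD_mem (l : List Int) (d : Int) (h : l ≠ []) : l.getLastD d ∈ l := by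
  induction l generalizing d with
  | nil => exact absurd rfl h
  | cons a t ih =>
    rw [List.getLastD_cons]
    rcases eq_or_ne t [] with rfl | ht
    · simp
    · exact List.mem_cons_of_mem _ (ih _ ht)

theorem pvHeadD_mem (l : List Int) (d : Int) (h : l ≠ []) : l.headD d ∈ l := by
  cases l with
  | nil => exact absurd rfl h
  | cons a t => simp

theorem pvPairwise_headD_le (l : List Int) (hp : l.Pairwise (· ≤ ·)) (d a : Int) (ha : a ∈ l) :
    l.headD d ≤ a := by
  cases l with
  | nil => simp at ha
  | cons h t =>
    rw [List.headD_cons]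
    rcases List.mem_cons.mp ha with rfl | hat
    · exact le_refl a
    · exact List.rel_of_pairwise_cons hp hat

theorem pvPairwise_le_getLastD (l : List Int) (hp : l.Pairwise (· ≤ ·)) (d a : Int) (ha : a ∈ l) :
    a ≤ l.getLastD d := by
  induction l generalizing d with
  | nil => simp at ha
  | cons h t ih =>
    rw [List.getLastD_cons]
    rcases List.mem_cons.mp ha with rfl | hat
    · rcases eq_or_ne t [] with rfl | ht
      · simp
      · exact List.rel_of_pairwise_cons hp (pvGetLastD_mem t a ht)
    · exact ih hp.of_cons _ hat

theorem pvZip_self {α : Type} (l : List α) : l.zip l = l.map (fun a => (a, a)) := by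
  induction l with
  | nil => rfl
  | cons a t ih => rw [List.zip_cons_cons, List.map_cons, ih]

theorem pvSum_map_sub (l : List Int) (f g : Int → Int) :
    (l.map (fun x => f x - g x)).sum = (l.map f).sum - (l.map g).sum := by
  induction l with
  | nil => rfl
  | cons a t ih => simp only [List.map_cons, List.sum_cons, ih]; ring

theorem pvCountP_le_split (l : List Int) (p : Int → Bool) (g : Int → Int) (i : Int) :
    l.countP (fun x => p x && decide (g x ≤ i)) =
    l.countP (fun x => p x && decide (g x ≤ i - 1)) + l.countP (fun x => p x && (g x == i)) := by
  induction l with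
  | nil => rfl
  | cons a t ih =>
    rw [List.countP_cons, List.countP_cons, List.countP_cons, ih]
    have hsplit : (if (p a && decide (g a ≤ i)) = true then 1 else 0)
        = (if (p a && decide (g a ≤ i - 1)) = true then 1 else 0)
          + (if (p a && (g a == i)) = true then 1 else 0) := by
      by_cases hp : p a = true
      · by_cases h1 : g a ≤ i - 1
        · by_cases h2 : g a = i
          · exact absurd h2 (by omega)
          · simp [hp, h1, h2, show g a ≤ i from by omega]
        · by_cases h2 : g a = i
          · simp [hp, h2]
          · simp [hp, h1, h2, show ¬ g a ≤ i from by omega]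
      · simp [hp]
    rw [hsplit]
    omega

theorem pvCountP_split (l : List Int) (p q : Int → Bool) :
    l.countP p = l.countP (fun x => p x && q x) + l.countP (fun x => p x && !q x) := by
  induction l with
  | nil => rfl
  | cons a t ih =>
    rw [List.countP_cons, List.countP_cons, List.countP_cons, ih]
    by_cases hp : p a = true <;> by_cases hq : q a = true <;> simp [hp, hq] <;> omega

theorem pvFold_reach_le (l : List Int) (g : Int → Int) (init i : Int) :
    (l.foldl (fun reach p => if g p > reach then g p else reach) init ≤ i) ↔
    (init ≤ i ∧ ∀ p ∈ l, g p ≤ i) := by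
  induction l generalizing init with
  | nil => simp
  | cons p t ih =>
    simp only [List.foldl_cons, List.mem_cons]
    rw [ih]
    by_cases hgt : g p > init
    · rw [if_pos hgt]
      constructor
      · rintro ⟨h1, h2⟩
        exact ⟨by omega, fun q hq => hq.elim (fun hqe => by subst hqe; omega) (h2 q)⟩
      · rintro ⟨h1, h2⟩
        exact ⟨h2 p (Or.inl rfl), fun q hq => h2 q (Or.inr hq)⟩
    · rw [if_neg hgt]
      constructor
      · rintro ⟨h1, h2⟩
        exact ⟨h1, fun q hq => hq.elim (fun hqe => by subst hqe; omega) (h2 q)⟩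
      · rintro ⟨h1, h2⟩
        exact ⟨h1, fun q hq => h2 q (Or.inr hq)⟩

theorem pvPyRange_nonpos (n : Int) (hn : n ≤ 0) : PySem.List.pyRange 0 n = [] := by
  rw [PySem.List.pyRange_of_pos 0 n Int.one_pos]
  simp [show ¬ (0:Int) < n from by omega]

theorem pvPyRange_one_range' (n' : Nat) (hn : 1 ≤ n') :
    PySem.List.pyRange 1 (n' : Int) = (List.range' 1 (n' - 1)).map (fun (k : Nat) => (k : Int)) := by
  rw [PySem.List.pyRange_of_pos 1 _ Int.one_pos]
  rcases Nat.lt_or_ge 1 n' with h1 | h1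
  · rw [if_pos (by exact_mod_cast h1)]
    have he : (((n' : Int) - 1 + 1 - 1) / 1).toNat = n' - 1 := by
      rw [Int.ediv_one]; omega
    rw [he, List.range'_eq_map_range, List.map_map]
    apply List.map_congr_left
    intro k _
    simp only [Function.comp_apply]
    push_cast
    ring
  · have h2 : n' = 1 := by omega
    subst h2
    rw [if_neg (by norm_num)]
    simp

-- ---- factor lists ----
theorem pvFacB_bounds (P : Array Int) (hP : pvSieveGood P) :
    ∀ (f : Nat) (a : Int), a ≤ 100000 → ∀ x ∈ pvFacB P f a, 2 ≤ x ∧ x ≤ 100000 := by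
  intro f
  induction f with
  | zero => intro a _ x hx; simp [pvFacB] at hx
  | succ f ih =>
    intro a ha x hx
    rw [pvFacB] at hx
    by_cases h1 : 1 < a
    · rw [if_pos h1] at hx
      have hbound := hP a.toNat (by omega) (by omega)
      rcases List.mem_cons.mp hx with rfl | hx'
      · exact hbound
      · refine ih _ ?_ x hx'
        have hpos : (0:Int) < P.getD a.toNat 0 := by omega
        rw [PySem.Int.floordiv_eq_ediv_of_pos hpos]
        calc a / P.getD a.toNat 0 ≤ a := Int.ediv_le_self _ (by omega)
          _ ≤ 100000 := ha
    · rw [if_neg h1] at hx; simp at hx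

theorem pvFacUpdA_eq_foldl (P : Array Int) :
    ∀ (f : Nat) (a i : Int) (rp : Array (Int × Int)),
      pvFacUpdA P f a i rp = (pvFacB P f a).foldl (fun rp x => pvUpdA rp x i) rp := by
  intro f
  induction f with
  | zero => intro a i rp; rfl
  | succ f ih =>
    intro a i rp
    by_cases h1 : 1 < a
    · have hstep : (if ((rp.getD (P.getD a.toNat 0).toNat (-1, -1)).1 == -1) = true
            then rp.setIfInBounds (P.getD a.toNat 0).toNat (i, i)
            else rp.setIfInBounds (P.getD a.toNat 0).toNat ((rp.getD (P.getD a.toNat 0).toNat (-1, -1)).1, i))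
          = pvUpdA rp (P.getD a.toNat 0) i := by
        unfold pvUpdA pvRngStep
        by_cases hc : ((rp.getD (P.getD a.toNat 0).toNat (-1, -1)).1 == -1) = true
        · rw [if_pos hc, if_pos hc]
        · rw [if_neg hc, if_neg hc]
      simp only [pvFacUpdA, pvFacB, if_pos h1, List.foldl_cons]
      rw [hstep, ih]
    · simp only [pvFacUpdA, pvFacB, if_neg h1]
      rfl

-- ---- event list facts ----
theorem pvMem_evs (P : Array Int) (arr : List Int) (n' : Nat) (e : Nat × Int) :
    e ∈ pvEvs P arr n' ↔ e.1 < n' ∧ e.2 ∈ pvF P arr e.1 := by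
  cases e with
  | mk j x =>
    simp only [pvEvs, List.mem_flatMap, List.mem_range, List.mem_map, Prod.mk.injEq]
    constructor
    · rintro ⟨j', hj', x', hx', rfl, rfl⟩; exact ⟨hj', hx'⟩
    · rintro ⟨hj, hx⟩; exact ⟨j, hj, x, hx, rfl, rfl⟩

theorem pvEvs_val_bounds (P : Array Int) (arr : List Int) (n' : Nat) (hP : pvSieveGood P)
    (hb : ∀ j, j < n' → arr.getD j 0 ≤ 100000) :
    ∀ e ∈ pvEvs P arr n', 2 ≤ e.2 ∧ e.2 ≤ 100000 := by
  intro e he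
  rw [pvMem_evs] at he
  exact pvFacB_bounds P hP _ _ (hb e.1 he.1) e.2 he.2

theorem pvPairwise_flatMap (l : List Nat) (hl : l.Pairwise (· < ·)) (g : Nat → List (Nat × Int))
    (hg : ∀ j, ∀ e ∈ g j, e.1 = j) : (l.flatMap g).Pairwise (fun a b => a.1 ≤ b.1) := by
  induction l with
  | nil => simp
  | cons j t ih =>
    rw [List.flatMap_cons]
    apply List.pairwise_append.mpr
    refine ⟨?_, ih hl.of_cons, ?_⟩
    · apply List.pairwise_of_forall_mem_list
      intro a ha b hb
      rw [hg j a ha, hg j b hb]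
    · intro a ha b hb
      obtain ⟨j', hj', hb'⟩ := List.mem_flatMap.mp hb
      rw [hg j a ha, hg j' b hb']
      exact le_of_lt (List.rel_of_pairwise_cons hl hj')

theorem pvEvs_pairwise (P : Array Int) (arr : List Int) (n' : Nat) :
    (pvEvs P arr n').Pairwise (fun a b => a.1 ≤ b.1) := by
  apply pvPairwise_flatMap _ List.pairwise_lt_range
  intro j e he
  obtain ⟨x, _, rfl⟩ := List.mem_map.mp he
  rfl

theorem pvOcc_pairwise (P : Array Int) (arr : List Int) (n' : Nat) (x : Int) :
    (pvOcc P arr n' x).Pairwise (· ≤ ·) := by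
  unfold pvOcc
  apply List.pairwise_map.mpr
  apply List.Pairwise.imp ?_ (List.Pairwise.filter _ (pvEvs_pairwise P arr n'))
  intro a b h
  exact_mod_cast h

theorem pvOcc_mem_bounds (P : Array Int) (arr : List Int) (n' : Nat) (x i : Int)
    (hi : i ∈ pvOcc P arr n' x) : 0 ≤ i ∧ i < (n' : Int) := by
  obtain ⟨e, he, rfl⟩ := List.mem_map.mp hi
  have := (pvMem_evs P arr n' e).mp (List.mem_of_mem_filter he)
  omega

theorem pvMem_occ (P : Array Int) (arr : List Int) (n' : Nat) (x : Int) (j : Nat) :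
    ((j : Nat) : Int) ∈ pvOcc P arr n' x ↔ (j < n' ∧ x ∈ pvF P arr j) := by
  unfold pvOcc
  simp only [List.mem_map, List.mem_filter, beq_iff_eq]
  constructor
  · rintro ⟨e, ⟨hev, he2⟩, hcast⟩
    have he1 : e.1 = j := by omega
    have := (pvMem_evs P arr n' e).mp hev
    rw [he1, he2] at this
    exact this
  · rintro ⟨hj, hx⟩
    exact ⟨(j, x), ⟨(pvMem_evs P arr n' (j, x)).mpr ⟨hj, hx⟩, rfl⟩, rfl⟩

theorem pvAct_iff (P : Array Int) (arr : List Int) (n' : Nat) (x : Int) :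
    pvAct P arr n' x = true ↔ pvOcc P arr n' x ≠ [] := by
  unfold pvAct
  simp

theorem pvFx_mem (P : Array Int) (arr : List Int) (n' : Nat) (x : Int)
    (h : pvOcc P arr n' x ≠ []) : pvFx P arr n' x ∈ pvOcc P arr n' x :=
  pvHeadD_mem _ _ h

theorem pvRx_mem (P : Array Int) (arr : List Int) (n' : Nat) (x : Int)
    (h : pvOcc P arr n' x ≠ []) : pvRx P arr n' x ∈ pvOcc P arr n' x :=
  pvGetLastD_mem _ _ h

theorem pvFx_le_rx (P : Array Int) (arr : List Int) (n' : Nat) (x : Int)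
    (h : pvOcc P arr n' x ≠ []) : pvFx P arr n' x ≤ pvRx P arr n' x :=
  pvPairwise_le_getLastD _ (pvOcc_pairwise P arr n' x) _ _ (pvFx_mem P arr n' x h)

-- ---- the range_p fold, per cell ----
theorem pvUpdA_size (rp : Array (Int × Int)) (x i : Int) : (pvUpdA rp x i).size = rp.size := by
  simp [pvUpdA]

theorem pvFoldUpd_cell (es : List (Nat × Int)) (rp : Array (Int × Int)) (hsz : rp.size = 100001)
    (hx : ∀ e ∈ es, 0 ≤ e.2 ∧ e.2 ≤ 100000) (c : Int) (hc0 : 0 ≤ c) (hc : c ≤ 100000) :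
    (es.foldl (fun rp e => pvUpdA rp e.2 ((e.1 : Nat) : Int)) rp).getD c.toNat (-1, -1)
      = ((es.filter (fun e => e.2 == c)).map (fun e => ((e.1 : Nat) : Int))).foldl pvRngStep
          (rp.getD c.toNat (-1, -1)) := by
  induction es generalizing rp with
  | nil => rfl
  | cons e t ih =>
    obtain ⟨he0, he5⟩ := hx e List.mem_cons_self
    simp only [List.foldl_cons, List.filter_cons]
    by_cases hec : e.2 == c
    · have hec' : e.2 = c := beq_iff_eq.mp hec
      rw [if_pos (by simp [hec]), List.map_cons, List.foldl_cons]
      rw [ih _ (by rw [pvUpdA_size]; exact hsz) (fun e' he' => hx e' (List.mem_cons_of_mem _ he'))]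
      congr 1
      unfold pvUpdA
      rw [pvArr_getD_set]
      rw [if_pos ⟨by rw [hec'], by omega⟩, hec']
    · have hec' : e.2 ≠ c := by simpa using hec
      rw [if_neg (by simpa using hec')]
      rw [ih _ (by rw [pvUpdA_size]; exact hsz) (fun e' he' => hx e' (List.mem_cons_of_mem _ he'))]
      congr 1
      unfold pvUpdA
      rw [pvArr_getD_set]
      rw [if_neg (by intro hh; exact hec' (by omega))]

theorem pvRng_fold_ne (l : List Int) (v : Int × Int) (h : v.1 ≠ -1) :
    l.foldl pvRngStep v = (v.1, l.getLastD v.2) := by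
  induction l generalizing v with
  | nil => simp
  | cons i t ih =>
    simp only [List.foldl_cons, List.getLastD_cons]
    rw [show pvRngStep v i = (v.1, i) from by unfold pvRngStep; rw [if_neg (by simpa using h)]]
    exact ih _ h

theorem pvRng_fold_cons (i : Int) (t : List Int) (h0 : 0 ≤ i) :
    (i :: t).foldl pvRngStep (-1, -1) = ((i :: t).headD 0, (i :: t).getLastD 0) := by
  simp only [List.foldl_cons, List.headD_cons, List.getLastD_cons]
  rw [show pvRngStep (-1, -1) i = (i, i) from by unfold pvRngStep; simp]
  rw [pvRng_fold_ne t (i, i) (by simp; omega)]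

-- characterised content of range_p
def pvRpChar (P : Array Int) (arr : List Int) (n' : Nat) (x : Int) : Int × Int :=
  if pvAct P arr n' x then (pvFx P arr n' x, pvRx P arr n' x) else (-1, -1)

theorem pvRpA_eq_evsfold (P : Array Int) (arr : List Int) (n' : Nat) :
    pvRpA P (n' : Int) arr =
      (pvEvs P arr n').foldl (fun rp e => pvUpdA rp e.2 ((e.1 : Nat) : Int))
        (Array.replicate 100001 ((-1 : Int), (-1 : Int))) := by
  unfold pvRpA pvEvs
  rw [PySem.List.pyRange_zero_natCast, List.foldl_map, List.foldl_flatMap]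
  congr 1
  funext rp j
  show pvFacUpdA P (PySem.List.pyGetD arr ((j : Nat) : Int) 0).toNat
      (PySem.List.pyGetD arr ((j : Nat) : Int) 0) ((j : Nat) : Int) rp = _
  rw [List.foldl_map, PySem.List.pyGetD_natCast, pvFacUpdA_eq_foldl]
  rfl

theorem pvRpA_char (P : Array Int) (arr : List Int) (n' : Nat)
    (hP : pvSieveGood P) (hb : ∀ j, j < n' → arr.getD j 0 ≤ 100000)
    (c : Int) (hc0 : 0 ≤ c) (hc : c ≤ 100000) :
    (pvRpA P (n' : Int) arr).getD c.toNat (-1, -1) = pvRpChar P arr n' c := by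
  rw [pvRpA_eq_evsfold]
  rw [pvFoldUpd_cell _ _ (by simp) ?hbnd c hc0 hc]
  case hbnd =>
    intro e he
    have := pvEvs_val_bounds P arr n' hP hb e he
    omega
  rw [pvArr_getD_replicate, if_pos (by omega)]
  show (pvOcc P arr n' c).foldl pvRngStep (-1, -1) = pvRpChar P arr n' c
  unfold pvRpChar
  cases hocc : pvOcc P arr n' c with
  | nil => simp [pvAct, hocc]
  | cons i t =>
    have hi0 : 0 ≤ i := by
      have := pvOcc_mem_bounds P arr n' c i (by rw [hocc]; simp)
      omega
    rw [pvRng_fold_cons i t hi0]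
    rw [if_pos (by rw [pvAct_iff, hocc]; simp)]
    unfold pvFx pvRx
    rw [hocc]

-- ---- mark difference-array stage ----
def pvXs : List Int := PySem.List.pyRange 2 100001

def pvContrib (P : Array Int) (arr : List Int) (n' : Nat) (j : Nat) (i : Int) : Int :=
  (if (pvAct P arr n' i && (pvFx P arr n' i == ((j : Nat) : Int))) = true then 1 else 0)
  - (if (pvAct P arr n' i && (pvRx P arr n' i == ((j : Nat) : Int))) = true then 1 else 0)

def pvHval (P : Array Int) (arr : List Int) (n' : Nat) (j : Nat) : Int :=
  (pvXs.map (pvContrib P arr n' j)).sum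

def pvGval (P : Array Int) (arr : List Int) (n' : Nat) : Nat → Int
  | 0 => pvHval P arr n' 0
  | j + 1 => pvGval P arr n' j + pvHval P arr n' (j + 1)

def pvMarkStep (P : Array Int) (arr : List Int) (n' : Nat) (mark : Array Int) (i : Int) : Array Int :=
  if (pvRpChar P arr n' i).1 != -1 then
    (mark.setIfInBounds (pvRpChar P arr n' i).1.toNat (mark.getD (pvRpChar P arr n' i).1.toNat 0 + 1)).setIfInBounds
      (pvRpChar P arr n' i).2.toNat
      ((mark.setIfInBounds (pvRpChar P arr n' i).1.toNat (mark.getD (pvRpChar P arr n' i).1.toNat 0 + 1)).getD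
        (pvRpChar P arr n' i).2.toNat 0 - 1)
  else mark

theorem pvMarkStep_size (P : Array Int) (arr : List Int) (n' : Nat) (m : Array Int) (i : Int) :
    (pvMarkStep P arr n' m i).size = m.size := by
  unfold pvMarkStep; split <;> simp

theorem pvMark1_fold_size (P : Array Int) (arr : List Int) (n' : Nat) :
    ∀ (S : List Int) (m : Array Int), (S.foldl (pvMarkStep P arr n') m).size = m.size := by
  intro S
  induction S with
  | nil => intro m; rfl
  | cons i t ih => intro m; rw [List.foldl_cons, ih, pvMarkStep_size]

theorem pvFx_bounds (P : Array Int) (arr : List Int) (n' : Nat) (x : Int)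
    (h : pvAct P arr n' x = true) : 0 ≤ pvFx P arr n' x ∧ pvFx P arr n' x < (n' : Int) :=
  pvOcc_mem_bounds P arr n' x _ (pvFx_mem P arr n' x ((pvAct_iff P arr n' x).mp h))

theorem pvRx_bounds (P : Array Int) (arr : List Int) (n' : Nat) (x : Int)
    (h : pvAct P arr n' x = true) : 0 ≤ pvRx P arr n' x ∧ pvRx P arr n' x < (n' : Int) :=
  pvOcc_mem_bounds P arr n' x _ (pvRx_mem P arr n' x ((pvAct_iff P arr n' x).mp h))

theorem pvMark1_fold_val (P : Array Int) (arr : List Int) (n' : Nat) :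
    ∀ (S : List Int) (m : Array Int), m.size = n' → ∀ j : Nat, j < n' →
    (S.foldl (pvMarkStep P arr n') m).getD j 0 = m.getD j 0 + (S.map (pvContrib P arr n' j)).sum := by
  intro S
  induction S with
  | nil => intro m _ j _; simp
  | cons i t ih =>
    intro m hsz j hj
    rw [List.foldl_cons, List.map_cons, List.sum_cons]
    rw [ih _ (by rw [pvMarkStep_size]; exact hsz) j hj]
    have hstep : (pvMarkStep P arr n' m i).getD j 0 = m.getD j 0 + pvContrib P arr n' j i := by
      by_cases hact : pvAct P arr n' i = true
      · have hchar : pvRpChar P arr n' i = (pvFx P arr n' i, pvRx P arr n' i) := by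
          unfold pvRpChar; rw [if_pos hact]
        have hc1 : (pvRpChar P arr n' i).1 = pvFx P arr n' i := by rw [hchar]
        have hc2 : (pvRpChar P arr n' i).2 = pvRx P arr n' i := by rw [hchar]
        obtain ⟨hf0, hfn⟩ := pvFx_bounds P arr n' i hact
        obtain ⟨hr0, hrn⟩ := pvRx_bounds P arr n' i hact
        unfold pvMarkStep
        rw [hc1, hc2]
        rw [if_pos (by simp only [bne_iff_ne, ne_eq]; omega)]
        set a1 := (pvFx P arr n' i).toNat with ha1
        set a2 := (pvRx P arr n' i).toNat with ha2
        set m1 := m.setIfInBounds a1 (m.getD a1 0 + 1) with hm1def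
        have hsz1 : m1.size = n' := by rw [hm1def]; simp [hsz]
        have hg1 : ∀ x : Nat, m1.getD x 0 = if a1 = x then m.getD a1 0 + 1 else m.getD x 0 := by
          intro x
          rw [hm1def, pvArr_getD_set]
          by_cases hx : a1 = x
          · rw [if_pos ⟨hx, by omega⟩, if_pos hx]
          · rw [if_neg (by tauto), if_neg hx]
        have hg2 : (m1.setIfInBounds a2 (m1.getD a2 0 - 1)).getD j 0
            = if a2 = j then m1.getD a2 0 - 1 else m1.getD j 0 := by
          rw [pvArr_getD_set]
          by_cases hx : a2 = j
          · rw [if_pos ⟨hx, by rw [hsz1]; omega⟩, if_pos hx]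
          · rw [if_neg (by tauto), if_neg hx]
        have hv1 : (if (pvAct P arr n' i && (pvFx P arr n' i == ((j : Nat) : Int))) = true then (1:Int) else 0)
            = if a1 = j then 1 else 0 := by
          by_cases h : a1 = j
          · rw [if_pos (by rw [hact, Bool.true_and, beq_iff_eq]; omega), if_pos h]
          · rw [if_neg (by rw [hact, Bool.true_and, beq_iff_eq]; omega), if_neg h]
        have hv2 : (if (pvAct P arr n' i && (pvRx P arr n' i == ((j : Nat) : Int))) = true then (1:Int) else 0)
            = if a2 = j then 1 else 0 := by
          by_cases h : a2 = j
          · rw [if_pos (by rw [hact, Bool.true_and, beq_iff_eq]; omega), if_pos h]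
          · rw [if_neg (by rw [hact, Bool.true_and, beq_iff_eq]; omega), if_neg h]
        unfold pvContrib
        rw [hv1, hv2, hg2, hg1, hg1]
        by_cases hj1 : a1 = j <;> by_cases hj2 : a2 = j <;> (simp [hj1, hj2]; try omega)
      · have hactf : pvAct P arr n' i = false := by
          cases h : pvAct P arr n' i
          · rfl
          · exact absurd h hact
        have hchar : pvRpChar P arr n' i = (-1, -1) := by
          unfold pvRpChar; rw [if_neg hact]
        have hc1 : (pvRpChar P arr n' i).1 = -1 := by rw [hchar]
        unfold pvMarkStep
        rw [hc1]
        rw [if_neg (by simp)]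
        unfold pvContrib
        rw [hactf]
        simp
    rw [hstep]
    ring

theorem pvMark1A_char (P : Array Int) (arr : List Int) (n' : Nat)
    (hP : pvSieveGood P) (hb : ∀ j, j < n' → arr.getD j 0 ≤ 100000) :
    pvMark1A (pvRpA P (n' : Int) arr) (n' : Int)
      = pvXs.foldl (pvMarkStep P arr n') (Array.replicate n' (0 : Int)) := by
  unfold pvMark1A pvXs
  rw [Int.toNat_natCast]
  apply PySem.List.foldl_congr_mem
  intro mark i hi
  have hbd := PySem.List.mem_pyRange_one.mp hi
  have hch := pvRpA_char P arr n' hP hb i (by omega) (by omega)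
  simp only [pvMarkStep, hch]

theorem pvMark2_fold (g h : Nat → Int) (n' : Nat)
    (hrec : ∀ j : Nat, 1 ≤ j → g j = g (j - 1) + h j) :
    ∀ (t s : Nat) (m : Array Int), m.size = n' → 1 ≤ s → s + t = n' →
    (∀ j : Nat, j < s → m.getD j 0 = g j) →
    (∀ j : Nat, s ≤ j → j < n' → m.getD j 0 = h j) →
    ∀ j : Nat, j < n' →
    (((List.range' s t).map (fun (k : Nat) => (k : Int))).foldl
      (fun mark i => mark.setIfInBounds i.toNat (mark.getD i.toNat 0 + mark.getD (i - 1).toNat 0)) m).getD j 0 = g j := by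
  intro t
  induction t with
  | zero =>
    intro s m hsz hs1 hst hg hh j hj
    simp only [List.range'_zero, List.map_nil, List.foldl_nil]
    exact hg j (by omega)
  | succ t ih =>
    intro s m hsz hs1 hst hg hh j hj
    rw [List.range'_succ, List.map_cons, List.foldl_cons]
    have ht1 : ((s : Nat) : Int).toNat = s := Int.toNat_natCast s
    have ht2 : (((s : Nat) : Int) - 1).toNat = s - 1 := by omega
    have hval : m.getD (((s : Nat) : Int)).toNat 0 + m.getD ((((s : Nat) : Int)) - 1).toNat 0 = g s := by
      rw [ht1, ht2, hh s (le_refl s) (by omega), hg (s - 1) (by omega), hrec s (by omega)]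
      ring
    refine ih (s + 1) _ (by simp [hsz]) (by omega) (by omega) ?_ ?_ j hj
    · intro j2 hj2
      rw [pvArr_getD_set]
      by_cases he : s = j2
      · rw [if_pos ⟨by omega, by rw [hsz]; omega⟩, hval, he]
      · rw [if_neg (by rintro ⟨he2, _⟩; omega)]
        exact hg j2 (by omega)
    · intro j2 hl hr
      rw [pvArr_getD_set, if_neg (by rintro ⟨he2, _⟩; omega)]
      exact hh j2 (by omega) hr

theorem pvMark2A_char (P : Array Int) (arr : List Int) (n' : Nat) (hn : 1 ≤ n') :
    ∀ j : Nat, j < n' →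
      (pvMark2A (pvXs.foldl (pvMarkStep P arr n') (Array.replicate n' (0 : Int))) (n' : Int)).getD j 0
        = pvGval P arr n' j := by
  have hsizeM1 : (pvXs.foldl (pvMarkStep P arr n') (Array.replicate n' (0 : Int))).size = n' := by
    rw [pvMark1_fold_size]; simp
  have hM1 : ∀ j : Nat, j < n' →
      (pvXs.foldl (pvMarkStep P arr n') (Array.replicate n' (0 : Int))).getD j 0 = pvHval P arr n' j := by
    intro j hj
    rw [pvMark1_fold_val P arr n' pvXs _ (by simp) j hj, pvArr_getD_replicate, if_pos hj]
    unfold pvHval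
    ring
  intro j hj
  unfold pvMark2A
  rw [pvPyRange_one_range' n' hn]
  refine pvMark2_fold (pvGval P arr n') (pvHval P arr n') n' ?_ (n' - 1) 1 _ hsizeM1 (le_refl 1) (by omega) ?_ ?_ j hj
  · intro j2 hj2
    cases j2 with
    | zero => omega
    | succ k => rw [Nat.add_sub_cancel]; rfl
  · intro j2 hj2
    have hj0 : j2 = 0 := by omega
    subst hj0
    rw [hM1 0 (by omega)]
    rfl
  · intro j2 h1 h2
    exact hM1 j2 h2

-- ---- counting form of the prefix sums ----
def pvCF (P : Array Int) (arr : List Int) (n' : Nat) (i : Int) : Nat :=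
  pvXs.countP (fun x => pvAct P arr n' x && decide (pvFx P arr n' x ≤ i))
def pvCR (P : Array Int) (arr : List Int) (n' : Nat) (i : Int) : Nat :=
  pvXs.countP (fun x => pvAct P arr n' x && decide (pvRx P arr n' x ≤ i))
def pvCS (P : Array Int) (arr : List Int) (n' : Nat) (i : Int) : Nat :=
  pvXs.countP (fun x => (pvAct P arr n' x && decide (pvFx P arr n' x ≤ i)) && !decide (pvRx P arr n' x ≤ i))

theorem pvFx_nonneg (P : Array Int) (arr : List Int) (n' : Nat) (x : Int)
    (h : pvAct P arr n' x = true) : 0 ≤ pvFx P arr n' x := (pvFx_bounds P arr n' x h).1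
theorem pvRx_nonneg (P : Array Int) (arr : List Int) (n' : Nat) (x : Int)
    (h : pvAct P arr n' x = true) : 0 ≤ pvRx P arr n' x := (pvRx_bounds P arr n' x h).1

theorem pvHval_eq (P : Array Int) (arr : List Int) (n' : Nat) (j : Nat) :
    pvHval P arr n' j
      = ((pvXs.countP (fun x => pvAct P arr n' x && (pvFx P arr n' x == ((j : Nat) : Int)))) : Int)
        - ((pvXs.countP (fun x => pvAct P arr n' x && (pvRx P arr n' x == ((j : Nat) : Int)))) : Int) := by
  unfold pvHval pvContrib
  rw [pvSum_map_sub pvXs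
    (fun i => if (pvAct P arr n' i && (pvFx P arr n' i == ((j : Nat) : Int))) = true then 1 else 0)
    (fun i => if (pvAct P arr n' i && (pvRx P arr n' i == ((j : Nat) : Int))) = true then 1 else 0)]
  rw [PySem.List.sum_map_ite_one_zero, PySem.List.sum_map_ite_one_zero]

theorem pvCF_zero_neg (P : Array Int) (arr : List Int) (n' : Nat) :
    pvXs.countP (fun x => pvAct P arr n' x && decide (pvFx P arr n' x ≤ ((0 : Nat) : Int) - 1)) = 0 := by
  rw [List.countP_eq_zero]
  intro x hx
  simp only [Bool.and_eq_true, decide_eq_true_eq, not_and]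
  intro ha
  have := pvFx_nonneg P arr n' x ha
  omega

theorem pvCR_zero_neg (P : Array Int) (arr : List Int) (n' : Nat) :
    pvXs.countP (fun x => pvAct P arr n' x && decide (pvRx P arr n' x ≤ ((0 : Nat) : Int) - 1)) = 0 := by
  rw [List.countP_eq_zero]
  intro x hx
  simp only [Bool.and_eq_true, decide_eq_true_eq, not_and]
  intro ha
  have := pvRx_nonneg P arr n' x ha
  omega

theorem pvGval_CF (P : Array Int) (arr : List Int) (n' : Nat) :
    ∀ j : Nat, pvGval P arr n' j
      = ((pvCF P arr n' ((j : Nat) : Int)) : Int) - ((pvCR P arr n' ((j : Nat) : Int)) : Int) := by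
  intro j
  induction j with
  | zero =>
    show pvHval P arr n' 0 = _
    rw [pvHval_eq]
    have hf := pvCountP_le_split pvXs (pvAct P arr n') (pvFx P arr n') ((0 : Nat) : Int)
    have hr := pvCountP_le_split pvXs (pvAct P arr n') (pvRx P arr n') ((0 : Nat) : Int)
    rw [pvCF_zero_neg] at hf
    rw [pvCR_zero_neg] at hr
    unfold pvCF pvCR
    omega
  | succ k ihk =>
    show pvGval P arr n' k + pvHval P arr n' (k + 1) = _
    rw [ihk, pvHval_eq]
    have hf := pvCountP_le_split pvXs (pvAct P arr n') (pvFx P arr n') (((k + 1 : Nat)) : Int)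
    have hr := pvCountP_le_split pvXs (pvAct P arr n') (pvRx P arr n') (((k + 1 : Nat)) : Int)
    rw [show (((k + 1 : Nat)) : Int) - 1 = ((k : Nat) : Int) from by push_cast; ring] at hf hr
    unfold pvCF pvCR
    omega

theorem pvGval_CS (P : Array Int) (arr : List Int) (n' : Nat) (j : Nat) :
    pvGval P arr n' j = ((pvCS P arr n' ((j : Nat) : Int)) : Int) := by
  rw [pvGval_CF]
  have hsplit := pvCountP_split pvXs
    (fun x => pvAct P arr n' x && decide (pvFx P arr n' x ≤ ((j : Nat) : Int)))
    (fun x => decide (pvRx P arr n' x ≤ ((j : Nat) : Int)))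
  have hcr : pvCR P arr n' ((j : Nat) : Int)
      = pvXs.countP (fun x => (pvAct P arr n' x && decide (pvFx P arr n' x ≤ ((j : Nat) : Int)))
          && decide (pvRx P arr n' x ≤ ((j : Nat) : Int))) := by
    unfold pvCR
    apply List.countP_congr
    intro x hx
    simp only [Bool.and_eq_true, decide_eq_true_eq]
    constructor
    · rintro ⟨ha, hrle⟩
      exact ⟨⟨ha, le_trans (pvFx_le_rx P arr n' x ((pvAct_iff P arr n' x).mp ha)) hrle⟩, hrle⟩
    · rintro ⟨⟨ha, _⟩, hrle⟩
      exact ⟨ha, hrle⟩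
  unfold pvCF pvCS
  omega

theorem pvGval_zero_iff (P : Array Int) (arr : List Int) (n' : Nat) (j : Nat) :
    pvGval P arr n' j = 0 ↔
      ∀ x ∈ pvXs, ¬(pvAct P arr n' x = true ∧ pvFx P arr n' x ≤ ((j : Nat) : Int)
        ∧ ¬ pvRx P arr n' x ≤ ((j : Nat) : Int)) := by
  rw [pvGval_CS]
  unfold pvCS
  rw [Int.natCast_eq_zero, List.countP_eq_zero]
  constructor
  · intro h x hx hc
    refine h x hx ?_
    simp only [Bool.and_eq_true, decide_eq_true_eq, Bool.not_eq_eq_eq_not, Bool.not_true,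
      decide_eq_false_iff_not]
    exact ⟨⟨hc.1, hc.2.1⟩, hc.2.2⟩
  · intro h x hx hc
    simp only [Bool.and_eq_true, decide_eq_true_eq, Bool.not_eq_eq_eq_not, Bool.not_true,
      decide_eq_false_iff_not] at hc
    exact h x hx ⟨hc.1.1, hc.1.2, hc.2⟩

-- ---- the last-occurrence dict ----
def pvLastE (P : Array Int) (arr : List Int) (n' : Nat) : PySem.Dict Int Int :=
  (pvEvs P arr n').foldl (fun d e => d.insert e.2 ((e.1 : Nat) : Int)) PySem.Dict.empty

theorem pvDict_getD_fold (es : List (Nat × Int)) (d : PySem.Dict Int Int) (k : Int) :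
    (es.foldl (fun d e => d.insert e.2 ((e.1 : Nat) : Int)) d).getD k 0 =
    ((es.filter (fun e => e.2 == k)).map (fun e => ((e.1 : Nat) : Int))).getLastD (d.getD k 0) := by
  induction es generalizing d with
  | nil => rfl
  | cons e t ih =>
    simp only [List.foldl_cons, List.filter_cons]
    by_cases he : e.2 = k
    · rw [if_pos (by simp [he]), List.map_cons, List.getLastD_cons, ih]
      congr 1
      rw [← he]
      exact PySem.Dict.getD_insert_self _ _ _ _
    · rw [if_neg (by simp [he]), ih]
      congr 1
      exact PySem.Dict.getD_insert_of_ne _ _ _ (Ne.symm he)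

theorem pvLast_getD (P : Array Int) (arr : List Int) (n' : Nat) (x : Int) :
    (pvLastE P arr n').getD x 0 = pvRx P arr n' x := by
  unfold pvLastE pvRx pvOcc
  rw [pvDict_getD_fold]
  congr 1

-- ---- running-maximum characterisation ----
theorem pvRv_le_iff (P : Array Int) (arr : List Int) (last : PySem.Dict Int Int) :
    ∀ (s : Nat) (i : Int), pvRv P arr last s ≤ i ↔
      (-1 ≤ i ∧ ∀ j : Nat, j < s → ∀ p ∈ pvF P arr j, last.getD p 0 ≤ i) := by
  intro s
  induction s with
  | zero => intro i; simp [pvRv]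
  | succ s ih =>
    intro i
    show ((pvF P arr s).foldl (fun reach p =>
      if last.getD p 0 > reach then last.getD p 0 else reach) (pvRv P arr last s)) ≤ i ↔ _
    rw [pvFold_reach_le, ih]
    constructor
    · rintro ⟨⟨hm, hall⟩, hs⟩
      refine ⟨hm, fun j hj p hp => ?_⟩
      rcases Nat.lt_succ_iff_lt_or_eq.mp hj with hj' | rfl
      · exact hall j hj' p hp
      · exact hs p hp
    · rintro ⟨hm, hall⟩
      exact ⟨⟨hm, fun j hj p hp => hall j (by omega) p hp⟩, fun p hp => hall s (by omega) p hp⟩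

theorem pvCond_iff (P : Array Int) (arr : List Int) (n' : Nat) (hP : pvSieveGood P)
    (hb : ∀ j, j < n' → arr.getD j 0 ≤ 100000) (s : Nat) (hs : s < n') :
    (pvGval P arr n' s = 0) ↔ pvRv P arr (pvLastE P arr n') (s + 1) ≤ ((s : Nat) : Int) := by
  rw [pvGval_zero_iff, pvRv_le_iff]
  constructor
  · intro h
    refine ⟨by omega, fun j hj p hp => ?_⟩
    have hjn : j < n' := by omega
    have hev : ((j, p) : Nat × Int) ∈ pvEvs P arr n' := (pvMem_evs P arr n' (j, p)).mpr ⟨hjn, hp⟩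
    have hocc : ((j : Nat) : Int) ∈ pvOcc P arr n' p := (pvMem_occ P arr n' p j).mpr ⟨hjn, hp⟩
    have hne : pvOcc P arr n' p ≠ [] := List.ne_nil_of_mem hocc
    have hact : pvAct P arr n' p = true := (pvAct_iff P arr n' p).mpr hne
    rw [pvLast_getD]
    have hbv := pvEvs_val_bounds P arr n' hP hb (j, p) hev
    have hpx : p ∈ pvXs := by
      unfold pvXs
      exact PySem.List.mem_pyRange_one.mpr (by omega)
    have hfx : pvFx P arr n' p ≤ ((s : Nat) : Int) :=
      le_trans (pvPairwise_headD_le _ (pvOcc_pairwise P arr n' p) 0 _ hocc) (by omega)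
    by_contra hc
    exact h p hpx ⟨hact, hfx, by omega⟩
  · rintro ⟨hm, hall⟩ x hx ⟨hact, hfx, hrx⟩
    have hne := (pvAct_iff P arr n' x).mp hact
    have hmem := pvFx_mem P arr n' x hne
    obtain ⟨e, hef, hecast⟩ := List.mem_map.mp hmem
    obtain ⟨hemem, hebeq⟩ := List.mem_filter.mp hef
    have he2 : e.2 = x := beq_iff_eq.mp hebeq
    have hev := (pvMem_evs P arr n' e).mp hemem
    have hjs : e.1 < s + 1 := by omega
    have hlast := hall e.1 hjs x (by rw [← he2]; exact hev.2)
    rw [pvLast_getD] at hlast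
    omega

-- ---- B-side shape ----
theorem pvFsB_eq (P : Array Int) (arr : List Int) (n' : Nat) :
    pvFsB P (n' : Int) arr = (List.range n').map (pvF P arr) := by
  unfold pvFsB
  rw [PySem.List.pyRange_zero_natCast, List.foldl_map]
  rw [show (fun (fs : List (List Int)) (j : Nat) =>
        (fun fs (i : Int) => fs ++ [pvFacB P (PySem.List.pyGetD arr i 0).toNat (PySem.List.pyGetD arr i 0)]) fs ((j : Nat) : Int))
      = (fun (fs : List (List Int)) (j : Nat) => fs ++ [pvF P arr j]) from ?_]
  · rw [PySem.List.foldl_append_singleton_eq_map]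
    rfl
  · funext fs j
    simp only [PySem.List.pyGetD_natCast]
    rfl

theorem pvZipIdx_fs (P : Array Int) (arr : List Int) (n' : Nat) :
    ((List.range n').map (pvF P arr)).zipIdx = (List.range n').map (fun j => (pvF P arr j, j)) := by
  rw [List.zipIdx_map, List.zipIdx_eq_zip_range', List.length_range, ← List.range_eq_range',
    pvZip_self, List.map_map]
  rfl

theorem pvLastB_eq (P : Array Int) (arr : List Int) (n' : Nat) :
    pvLastB ((List.range n').map (pvF P arr)) = pvLastE P arr n' := by
  unfold pvLastB pvLastE pvEvs
  rw [pvZipIdx_fs, List.foldl_map, List.foldl_flatMap]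
  congr 1
  funext d j
  show (pvF P arr j).foldl (fun last p => last.insert p ((j : Nat) : Int)) d = _
  rw [List.foldl_map]

-- ---- the two scans agree ----
theorem pvScan_eq (P : Array Int) (arr : List Int) (n' : Nat) (hP : pvSieveGood P)
    (hb : ∀ j, j < n' → arr.getD j 0 ≤ 100000) (m2 : Array Int)
    (hm2 : ∀ j : Nat, j < n' → m2.getD j 0 = pvGval P arr n' j) :
    ∀ (t s : Nat), s + t = n' →
      pvFindA m2 ((List.range' s t).map (fun (k : Nat) => (k : Int))) =
      pvScanB (pvLastE P arr n') ((List.range' s t).map (fun j => (pvF P arr j, j)))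
        (pvRv P arr (pvLastE P arr n') s) := by
  intro t
  induction t with
  | zero => intro s hst; simp only [List.range'_zero, List.map_nil]; rfl
  | succ t ih =>
    intro s hst
    rw [List.range'_succ, List.map_cons, List.map_cons, pvFindA]
    have hs : s < n' := by omega
    have hguard : m2.getD (((s : Nat) : Int)).toNat 0 = pvGval P arr n' s := by
      rw [Int.toNat_natCast]
      exact hm2 s hs
    have hcond := pvCond_iff P arr n' hP hb s hs
    show _ = pvScanB (pvLastE P arr n') ((pvF P arr s, s) :: _) (pvRv P arr (pvLastE P arr n') s)
    rw [pvScanB]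
    have hreach : (pvF P arr s).foldl (fun reach p =>
        if (pvLastE P arr n').getD p 0 > reach then (pvLastE P arr n').getD p 0 else reach)
        (pvRv P arr (pvLastE P arr n') s) = pvRv P arr (pvLastE P arr n') (s + 1) := rfl
    by_cases hz : pvGval P arr n' s = 0
    · rw [if_pos (by rw [hguard]; exact beq_iff_eq.mpr hz)]
      rw [if_pos (by rw [hreach]; exact hcond.mp hz)]
    · rw [if_neg (by rw [hguard]; simpa using hz)]
      rw [if_neg (by rw [hreach]; intro hc; exact hz (hcond.mpr hc))]
      rw [hreach]
      exact ih (s + 1) (by omega)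

-- ---- per-case and top-level assembly ----
theorem pvCase_eq (P : Array Int) (hP : pvSieveGood P) (n : Int) (arr : List Int)
    (hlen : n ≤ (arr.length : Int)) (htake : ∀ x ∈ arr.take n.toNat, x ≤ 100000) :
    pvCaseA P n arr = pvCaseB P n arr := by
  by_cases hn : n ≤ 0
  · have h0 : PySem.List.pyRange 0 n = [] := pvPyRange_nonpos n hn
    unfold pvCaseA pvCaseB pvFsB
    rw [h0]
    rfl
  · have hn0 : 0 < n := by omega
    obtain ⟨n', rfl⟩ : ∃ n' : Nat, n = (n' : Int) := ⟨n.toNat, by omega⟩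
    have hn' : 1 ≤ n' := by omega
    have hb : ∀ j, j < n' → arr.getD j 0 ≤ 100000 := by
      intro j hj
      have hjlen : j < arr.length := by omega
      rw [List.getD_eq_getElem arr 0 hjlen]
      apply htake
      rw [Int.toNat_natCast]
      have hlt : j < (arr.take n').length := by
        simp only [List.length_take]
        omega
      have hget : (arr.take n')[j]'hlt = arr[j]'hjlen := List.getElem_take
      rw [← hget]
      exact List.getElem_mem hlt
    unfold pvCaseA
    rw [pvMark1A_char P arr n' hP hb]
    simp only [pvCaseB]
    rw [pvFsB_eq P arr n', pvZipIdx_fs P arr n', pvLastB_eq P arr n']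
    rw [PySem.List.pyRange_zero_natCast, List.range_eq_range']
    exact pvScan_eq P arr n' hP hb _ (pvMark2A_char P arr n' hn') n' 0 (by omega)

-- ===== VERDICT (by name: the statement is the Claim_ definition above) =====
theorem find_cut_position_spec : Claim_equal_find_cut_position := by
  unfold Claim_equal_find_cut_position
  intro tcs _ hpre
  unfold Pre_find_cut_position at hpre
  unfold Spec_find_cut_position find_cut_position find_cut_position_alt
  rw [pvSieveB_eq]
  apply PySem.List.foldl_congr_mem
  intro acc c hc
  exact congrArg (acc ++ ·) (pvCase_eq pvSieveA pvSieveA_good c.1 c.2 (hpre c hc).1 (hpre c hc).2)
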